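-- pv_equiv track=rewrite | github.com/yashitanamdeo/geeks-for-geeks | Medium/maximum_occured_integer.py | maxOccured
-- ===== SOURCE A (Python) =====
-- def maxOccured(n, l, r, maxx):
--     freq=[0]*(maxx+2)
--     for i in range(n):
--         freq[l[i]]+=1
--         freq[r[i]+1]-=1
--     ans,curr=0,freq[0]
--     for i in range(1,maxx+1):
--         freq[i]+=freq[i-1]
--         if freq[i]>curr:
--             curr=freq[i]
--             ans=i
--     return ans
-- ===== SOURCE B (Python) =====
-- def maxOccured(n, l, r, maxx):
--     # Sort the start and end points once, then sweep the points 0..maxx with two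
--     # pointers: at point j the coverage is (#starts <= j) - (#ends < j).
--     # No frequency/difference array is built.
--     starts = sorted(l[i] for i in range(n))
--     ends = sorted(r[i] for i in range(n))
--     si = ei = 0
--     best = 0
--     best_cnt = None
--     for j in range(0, maxx + 1):
--         while si < len(starts) and starts[si] <= j:
--             si += 1
--         while ei < len(ends) and ends[ei] < j:
--             ei += 1
--         c = si - ei
--         if best_cnt is None or c > best_cnt:
--             best_cnt = c
--             best = j
--     return best
-- ===== Notes on version B (the rewrite author's own statement) =====
-- stated objective: alternative
-- what changed: Replaces A's difference-array plus in-place prefix-sum pass by sorting the start and end points once and sweeping the points 0..maxx with two advancing pointers (coverage = #starts<=j minus #ends<j), keeping only the running best pair; no frequency array is built or mutated.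
-- outside the precondition, e.g. on maxOccured(1, [-2], [2], 2): A returns 2, B returns 0
import Mathlib
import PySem

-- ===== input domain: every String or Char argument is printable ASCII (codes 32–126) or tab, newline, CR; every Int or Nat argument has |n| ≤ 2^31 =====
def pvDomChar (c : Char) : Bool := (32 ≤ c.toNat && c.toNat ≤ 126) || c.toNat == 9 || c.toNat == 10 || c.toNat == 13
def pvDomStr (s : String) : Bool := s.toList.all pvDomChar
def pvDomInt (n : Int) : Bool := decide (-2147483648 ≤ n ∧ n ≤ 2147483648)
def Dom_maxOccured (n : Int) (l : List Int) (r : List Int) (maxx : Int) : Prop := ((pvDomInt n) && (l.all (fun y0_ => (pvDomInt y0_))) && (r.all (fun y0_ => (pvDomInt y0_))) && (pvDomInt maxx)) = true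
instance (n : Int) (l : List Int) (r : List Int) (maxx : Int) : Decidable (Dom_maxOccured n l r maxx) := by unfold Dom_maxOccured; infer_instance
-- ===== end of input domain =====

-- B replaces A's difference-array + in-place prefix-sum pass by sorting the start/end points
-- once and sweeping 0..maxx with two pointers (alternative algorithm; not claimed faster).


-- ===== PORT A =====
-- Python list read/write on the freq array (Array for O(1) updates): same index rule as
-- PySem.List.pyGet?/pySet? (negative wraps once; out of range raises in Python — excluded
-- by Pre_, a harmless no-op/default here).
def pvAGet (f : Array Int) (i : Int) : Int :=
  match PySem.List.pyIdx? f.size i with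
  | some k => f.getD k 0
  | none => 0

def pvASet (f : Array Int) (i : Int) (v : Int) : Array Int :=
  match PySem.List.pyIdx? f.size i with
  | some k => f.setIfInBounds k v
  | none => f

-- one body of A's first loop: freq[l[i]] += 1 ; freq[r[i]+1] -= 1
def aAdd (l r : List Int) (f : Array Int) (i : Int) : Array Int :=
  let f1 := pvASet f (PySem.List.pyGetD l i 0)
              (pvAGet f (PySem.List.pyGetD l i 0) + 1)
  pvASet f1 (PySem.List.pyGetD r i 0 + 1)
    (pvAGet f1 (PySem.List.pyGetD r i 0 + 1) - 1)

-- one body of A's second loop: freq[i] += freq[i-1]; if freq[i] > curr: curr, ans = freq[i], i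
-- (state = (ans, curr, freq))
def aScan (s : Int × Int × Array Int) (i : Int) : Int × Int × Array Int :=
  let f := pvASet s.2.2 i (pvAGet s.2.2 i + pvAGet s.2.2 (i - 1))
  if pvAGet f i > s.2.1 then (i, pvAGet f i, f)
  else (s.1, s.2.1, f)

def maxOccured (n : Int) (l : List Int) (r : List Int) (maxx : Int) : Int :=
  let freq0 : Array Int := Array.replicate (maxx + 2).toNat 0
  let freq := (PySem.List.pyRange 0 n 1).foldl (aAdd l r) freq0
  ((PySem.List.pyRange 1 (maxx + 1) 1).foldl aScan (0, pvAGet freq 0, freq)).1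

-- ===== PORT B =====
-- 'while i < len(xs) and p(xs[i]): i += 1'
def bAdvance (xs : List Int) (p : Int → Bool) (i : Nat) : Nat :=
  if h : i < xs.length then (if p xs[i] then bAdvance xs p (i + 1) else i) else i
termination_by xs.length - i

-- one body of B's sweep (state = (si, ei, best, best_cnt))
def bStep (starts ends : List Int) (s : Nat × Nat × Int × Option Int) (j : Int) :
    Nat × Nat × Int × Option Int :=
  let si := bAdvance starts (fun x => decide (x ≤ j)) s.1
  let ei := bAdvance ends (fun x => decide (x < j)) s.2.1
  let c : Int := (si : Int) - (ei : Int)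
  match s.2.2.2 with
  | none => (si, ei, j, some c)
  | some bc => if c > bc then (si, ei, j, some c) else (si, ei, s.2.2.1, some bc)

def maxOccured_alt (n : Int) (l : List Int) (r : List Int) (maxx : Int) : Int :=
  let starts := PySem.List.sorted
    ((PySem.List.pyRange 0 n 1).map (fun i => PySem.List.pyGetD l i 0)) (fun x => x) false
  let ends := PySem.List.sorted
    ((PySem.List.pyRange 0 n 1).map (fun i => PySem.List.pyGetD r i 0)) (fun x => x) false
  ((PySem.List.pyRange 0 (maxx + 1) 1).foldl (bStep starts ends) (0, 0, 0, none)).2.2.1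

-- ===== PRECONDITION & SPEC =====
-- Pre_ excludes the inputs where A raises IndexError (n beyond a list's length, maxx ≤ -2,
-- endpoints past maxx+1 or below -(maxx+2)) and, restricting to the task's natural domain
-- of non-negative range endpoints, the inputs with some l[i] < 0 or r[i] < -1, on which A
-- returns only via Python's accidental negative-index wraparound into the freq array.
def Pre_maxOccured (n : Int) (l : List Int) (r : List Int) (maxx : Int) : Prop :=
  -1 ≤ maxx ∧ n ≤ (l.length : Int) ∧ n ≤ (r.length : Int) ∧
  (∀ x ∈ l.take n.toNat, 0 ≤ x ∧ x ≤ maxx + 1) ∧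
  (∀ x ∈ r.take n.toNat, -1 ≤ x ∧ x ≤ maxx)
instance (n : Int) (l : List Int) (r : List Int) (maxx : Int) : Decidable (Pre_maxOccured n l r maxx) := by unfold Pre_maxOccured; infer_instance

def pvWitness_maxOccured : Int × List Int × List Int × Int := (3, [1, 0, 2], [2, 1, 2], 4)

def Spec_maxOccured (n : Int) (l : List Int) (r : List Int) (maxx : Int) (out : Int) : Prop := out = maxOccured_alt n l r maxx
instance (n : Int) (l : List Int) (r : List Int) (maxx : Int) (out : Int) : Decidable (Spec_maxOccured n l r maxx out) := by unfold Spec_maxOccured; infer_instance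

-- ===== CLAIM (what is proved, stated in full; the proofs are below) =====
def Claim_equal_maxOccured : Prop := ∀ (n : Int) (l : List Int) (r : List Int) (maxx : Int), Dom_maxOccured n l r maxx → Pre_maxOccured n l r maxx → Spec_maxOccured n l r maxx (maxOccured n l r maxx)

-- ===== LEMMAS AND PROOFS =====

-- list-level mirrors of A's array steps (the proofs run over lists)
def aAddL (l r : List Int) (f : List Int) (i : Int) : List Int :=
  let f1 := PySem.List.pySetD f (PySem.List.pyGetD l i 0)
              (PySem.List.pyGetD f (PySem.List.pyGetD l i 0) 0 + 1)
  PySem.List.pySetD f1 (PySem.List.pyGetD r i 0 + 1)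
    (PySem.List.pyGetD f1 (PySem.List.pyGetD r i 0 + 1) 0 - 1)

def aScanL (s : Int × Int × List Int) (i : Int) : Int × Int × List Int :=
  if PySem.List.pyGetD (PySem.List.pySetD s.2.2 i
        (PySem.List.pyGetD s.2.2 i 0 + PySem.List.pyGetD s.2.2 (i - 1) 0)) i 0 > s.2.1 then
    (i, PySem.List.pyGetD (PySem.List.pySetD s.2.2 i
        (PySem.List.pyGetD s.2.2 i 0 + PySem.List.pyGetD s.2.2 (i - 1) 0)) i 0,
      PySem.List.pySetD s.2.2 i
        (PySem.List.pyGetD s.2.2 i 0 + PySem.List.pyGetD s.2.2 (i - 1) 0))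
  else (s.1, s.2.1, PySem.List.pySetD s.2.2 i
        (PySem.List.pyGetD s.2.2 i 0 + PySem.List.pyGetD s.2.2 (i - 1) 0))

-- the (unsorted) coverage count at point j read off l, r directly
def coverC (n : Int) (l r : List Int) (j : Int) : Int :=
  (((PySem.List.pyRange 0 n 1).countP (fun i => decide (PySem.List.pyGetD l i 0 ≤ j))) : Int)
  - (((PySem.List.pyRange 0 n 1).countP (fun i => decide (PySem.List.pyGetD r i 0 < j))) : Int)

-- partial sum of the first j+1 cells of the frequency array
def psum (f : List Int) (j : Nat) : Int := (f.take (j + 1)).sum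

-- ---- array/list bridge ----

lemma pvAGet_eq (f : Array Int) (i : Int) :
    pvAGet f i = PySem.List.pyGetD f.toList i 0 := by
  unfold pvAGet PySem.List.pyGetD PySem.List.pyGet?
  rw [Array.length_toList]
  cases h : PySem.List.pyIdx? f.size i with
  | none => simp
  | some k =>
    simp only [Option.bind]
    by_cases hk : k < f.size
    · rw [Array.getD, dif_pos hk]
      rw [List.getElem?_eq_getElem (by simpa using hk)]
      simp [Array.getElem_toList]
    · rw [Array.getD, dif_neg hk]
      rw [List.getElem?_eq_none (by simpa using hk)]
      rfl

lemma pvASet_toList (f : Array Int) (i : Int) (v : Int) :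
    (pvASet f i v).toList = PySem.List.pySetD f.toList i v := by
  unfold pvASet PySem.List.pySetD PySem.List.pySet?
  rw [Array.length_toList]
  cases h : PySem.List.pyIdx? f.size i with
  | none => simp
  | some k => simp [Array.toList_setIfInBounds]

lemma aAdd_toList (l r : List Int) (f : Array Int) (i : Int) :
    (aAdd l r f i).toList = aAddL l r f.toList i := by
  unfold aAdd aAddL
  simp only [pvASet_toList, pvAGet_eq]

lemma foldA_toList (l r : List Int) (idxs : List Int) (f : Array Int) :
    (idxs.foldl (aAdd l r) f).toList = idxs.foldl (aAddL l r) f.toList := by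
  induction idxs generalizing f with
  | nil => rfl
  | cons i t ih => simp only [List.foldl_cons, ih, aAdd_toList]

lemma aScan_corr (s : Int × Int × Array Int) (i : Int) :
    ((aScan s i).1, (aScan s i).2.1, (aScan s i).2.2.toList)
      = aScanL (s.1, s.2.1, s.2.2.toList) i := by
  unfold aScan aScanL
  simp only [pvASet_toList, pvAGet_eq]
  split_ifs <;> simp [pvASet_toList]

lemma foldScan_corr (idxs : List Int) (s : Int × Int × Array Int) :
    ((idxs.foldl aScan s).1, (idxs.foldl aScan s).2.1, (idxs.foldl aScan s).2.2.toList)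
      = idxs.foldl aScanL (s.1, s.2.1, s.2.2.toList) := by
  induction idxs generalizing s with
  | nil => rfl
  | cons i t ih => simp only [List.foldl_cons, ih (aScan s i), aScan_corr]

-- ---- partial sums ----

lemma sum_set (L : List Int) (i : Nat) (v : Int) (h : i < L.length) :
    (L.set i v).sum = L.sum - L[i] + v := by
  induction L generalizing i with
  | nil => simp at h
  | cons x xs ih =>
    cases i with
    | zero => simp [List.set]; ring
    | succ m =>
      simp only [List.set, List.sum_cons, List.getElem_cons_succ]
      rw [ih m (by simpa using h)]; ring

lemma psum_zero (f : List Int) : psum f 0 = f.getD 0 0 := by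
  cases f <;> simp [psum]

lemma psum_succ (f : List Int) (j : Nat) :
    psum f (j + 1) = psum f j + f.getD (j + 1) 0 := by
  unfold psum
  rw [List.take_add_one]
  cases h : f[j+1]? <;> simp [h, List.getD]

lemma psum_set (f : List Int) (a : Nat) (v : Int) (ha : a < f.length) (j : Nat) :
    psum (f.set a v) j = psum f j + (if a ≤ j then v - f.getD a 0 else 0) := by
  unfold psum
  rw [List.take_set]
  by_cases hcase : a ≤ j
  · have hlen : a < (f.take (j+1)).length := by simp; omega
    rw [sum_set _ _ _ hlen]
    have h2 : (f.take (j+1))[a]'hlen = f[a]'ha := by simp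
    rw [h2, List.getD_eq_getElem f 0 ha]
    simp [hcase]; ring
  · rw [List.set_eq_of_length_le (by simp; omega)]
    simp [hcase]

lemma pyRange_zero_toNat (n : Int) :
    PySem.List.pyRange 0 n 1 = PySem.List.pyRange 0 (n.toNat : Int) 1 := by
  simp only [PySem.List.pyRange_one]
  have h : (n - 0).toNat = ((n.toNat : Int) - 0).toNat := by omega
  rw [h]

lemma coverC_toNat (n : Int) (l r : List Int) (j : Int) :
    coverC n l r j = coverC (n.toNat : Int) l r j := by
  unfold coverC
  rw [pyRange_zero_toNat]

-- ---- phase 1: after A's first loop the partial sums of freq are the coverage counts ----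

lemma aAddL_psum (l r : List Int) (maxx : Int) (N : Nat) (F : List Int)
    (hlenF : F.length = (maxx + 2).toNat)
    (hNl : N < l.length) (hNr : N < r.length)
    (hla : 0 ≤ l[N]) (hlb : l[N] ≤ maxx + 1)
    (hra : -1 ≤ r[N]) (hrb : r[N] ≤ maxx) (j : Nat) :
    psum (aAddL l r F (N : Int)) j
      = psum F j + (if l[N] ≤ (j : Int) then 1 else 0)
          - (if r[N] < (j : Int) then 1 else 0) := by
  have hgl : PySem.List.pyGetD l (N : Int) 0 = l[N] := by
    simp [PySem.List.pyGetD_natCast, hNl]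
  have hgr : PySem.List.pyGetD r (N : Int) 0 = r[N] := by
    simp [PySem.List.pyGetD_natCast, hNr]
  have haN : l[N].toNat < F.length := by rw [hlenF]; omega
  have hbN : (r[N] + 1).toNat < F.length := by rw [hlenF]; omega
  unfold aAddL
  simp only [hgl, hgr]
  rw [PySem.List.pySetD_of_nonneg F _ hla,
    PySem.List.pyGetD_eq_getElem F 0 hla (by omega)]
  set F1 := F.set l[N].toNat (F[l[N].toNat] + 1) with hF1
  have hlen1 : F1.length = F.length := by simp [hF1]
  rw [PySem.List.pySetD_of_nonneg F1 _ (by omega),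
    PySem.List.pyGetD_eq_getElem F1 0 (by omega) (by rw [hlen1]; omega)]
  have e1 : psum F1 j = psum F j + (if l[N].toNat ≤ j then 1 else 0) := by
    rw [hF1, psum_set F _ _ haN j, List.getD_eq_getElem F 0 haN]
    split <;> ring
  have e2 : psum (F1.set (r[N] + 1).toNat (F1[(r[N] + 1).toNat]'(by omega) - 1)) j
      = psum F1 j - (if (r[N] + 1).toNat ≤ j then 1 else 0) := by
    rw [psum_set F1 _ _ (by omega) j,
      List.getD_eq_getElem F1 0 (by omega : (r[N] + 1).toNat < F1.length)]
    split <;> ring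
  rw [e2, e1]
  have c1 : (l[N].toNat ≤ j) ↔ (l[N] ≤ (j : Int)) := by omega
  have c2 : ((r[N] + 1).toNat ≤ j) ↔ (r[N] < (j : Int)) := by omega
  simp only [c1, c2]

lemma coverC_succ (l r : List Int) (N : Nat) (j : Int)
    (hNl : N < l.length) (hNr : N < r.length) :
    coverC ((N + 1 : Nat) : Int) l r j
      = coverC (N : Int) l r j + (if l[N] ≤ j then 1 else 0)
          - (if r[N] < j then 1 else 0) := by
  have hrange : PySem.List.pyRange 0 ((N + 1 : Nat) : Int) 1
      = PySem.List.pyRange 0 (N : Int) 1 ++ [(N : Int)] := by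
    push_cast
    exact PySem.List.pyRange_one_succ_right (by omega)
  have hgl : PySem.List.pyGetD l (N : Int) 0 = l[N] := by
    simp [PySem.List.pyGetD_natCast, hNl]
  have hgr : PySem.List.pyGetD r (N : Int) 0 = r[N] := by
    simp [PySem.List.pyGetD_natCast, hNr]
  unfold coverC
  rw [hrange]
  simp only [List.countP_append, List.countP_cons, List.countP_nil, hgl, hgr]
  push_cast
  split_ifs <;> simp_all <;> ring

lemma phase1 (l r : List Int) (maxx : Int) (N : Nat)
    (hl : N ≤ l.length) (hr : N ≤ r.length)
    (hbl : ∀ k, k < N → ∀ h2 : k < l.length, 0 ≤ l[k] ∧ l[k] ≤ maxx + 1)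
    (hbr : ∀ k, k < N → ∀ h2 : k < r.length, -1 ≤ r[k] ∧ r[k] ≤ maxx) :
    ((PySem.List.pyRange 0 (N : Int) 1).foldl (aAddL l r)
        (List.replicate (maxx + 2).toNat 0)).length = (maxx + 2).toNat ∧
    ∀ j : Nat, psum ((PySem.List.pyRange 0 (N : Int) 1).foldl (aAddL l r)
        (List.replicate (maxx + 2).toNat 0)) j = coverC (N : Int) l r (j : Int) := by
  induction N with
  | zero =>
    rw [PySem.List.pyRange_one_eq_nil (by omega)]
    constructor
    · simp
    · intro j
      simp [psum, coverC, PySem.List.pyRange_one_eq_nil, List.take_replicate]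
  | succ N ih =>
    obtain ⟨ihlen, ihsum⟩ := ih (by omega) (by omega)
      (fun k hk h2 => hbl k (by omega) h2) (fun k hk h2 => hbr k (by omega) h2)
    have hrange : PySem.List.pyRange 0 ((N + 1 : Nat) : Int) 1
        = PySem.List.pyRange 0 (N : Int) 1 ++ [(N : Int)] := by
      push_cast
      exact PySem.List.pyRange_one_succ_right (by omega)
    rw [hrange, List.foldl_append]
    set F := (PySem.List.pyRange 0 (N : Int) 1).foldl (aAddL l r)
        (List.replicate (maxx + 2).toNat 0) with hF
    have hNl : N < l.length := by omega
    have hNr : N < r.length := by omega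
    obtain ⟨hla, hlb⟩ := hbl N (by omega) hNl
    obtain ⟨hra, hrb⟩ := hbr N (by omega) hNr
    constructor
    · simp only [List.foldl_cons, List.foldl_nil, aAddL, PySem.List.length_pySetD]
      exact ihlen
    · intro j
      simp only [List.foldl_cons, List.foldl_nil]
      rw [aAddL_psum l r maxx N F ihlen hNl hNr hla hlb hra hrb j,
        coverC_succ l r N (j : Int) hNl hNr, ihsum j]

-- ---- the two-pointer side: counts on a sorted list ----

lemma countP_down_sorted (xs : List Int) (p : Int → Bool)
    (hp : ∀ a b : Int, a ≤ b → p b = true → p a = true) :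
    xs.Pairwise (· ≤ ·) →
    ∀ k (hk : k < xs.length), (p xs[k] = true ↔ k < xs.countP p) := by
  induction xs with
  | nil => intro _ k hk; simp at hk
  | cons x t ih =>
    intro hs k hk
    rw [List.pairwise_cons] at hs
    by_cases hx : p x = true
    · cases k with
      | zero => simp [List.countP_cons, hx]
      | succ m =>
        have := ih hs.2 m (by simpa using hk)
        simp [List.countP_cons, hx]
        omega
    · have ht : t.countP p = 0 := by
        rw [List.countP_eq_zero]
        intro y hy hpy
        exact hx (hp x y (hs.1 y hy) hpy)
      cases k with
      | zero => simp [List.countP_cons, hx, ht]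
      | succ m =>
        have hm : m < t.length := by simpa using hk
        have : p t[m] ≠ true := by
          rw [List.countP_eq_zero] at ht
          exact ht t[m] (List.getElem_mem hm)
        simp only [List.getElem_cons_succ, List.countP_cons, hx, ht]
        simp [this]

lemma bAdvance_count (xs : List Int) (p : Int → Bool)
    (hchar : ∀ k (hk : k < xs.length), (p xs[k] = true ↔ k < xs.countP p)) :
    ∀ fuel i, xs.length - i ≤ fuel → i ≤ xs.countP p → bAdvance xs p i = xs.countP p := by
  intro fuel
  induction fuel with
  | zero =>
    intro i hfi hi
    have hcl := List.countP_le_length (p := p) (l := xs)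
    rw [bAdvance]
    have : ¬ i < xs.length := by omega
    rw [dif_neg this]
    omega
  | succ fuel ih =>
    intro i hfi hi
    have hcl := List.countP_le_length (p := p) (l := xs)
    rw [bAdvance]
    by_cases hlt : i < xs.length
    · rw [dif_pos hlt]
      by_cases hpi : p xs[i] = true
      · rw [if_pos hpi]
        have : i < xs.countP p := (hchar i hlt).mp hpi
        exact ih (i + 1) (by omega) (by omega)
      · rw [if_neg hpi]
        have : ¬ i < xs.countP p := fun h => hpi ((hchar i hlt).mpr h)
        omega
    · rw [dif_neg hlt]
      omega

-- advancing from the count at j' to the count at j (j' ≤ j)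
lemma bAdvance_le (xs : List Int) (hs : xs.Pairwise (· ≤ ·)) (j : Int) (i : Nat)
    (hi : i ≤ xs.countP (fun x => decide (x ≤ j))) :
    bAdvance xs (fun x => decide (x ≤ j)) i = xs.countP (fun x => decide (x ≤ j)) := by
  exact bAdvance_count xs _ (countP_down_sorted xs _
    (fun a b hab hb => by simp at hb ⊢; omega) hs) xs.length i (by omega) hi

lemma bAdvance_lt (xs : List Int) (hs : xs.Pairwise (· ≤ ·)) (j : Int) (i : Nat)
    (hi : i ≤ xs.countP (fun x => decide (x < j))) :
    bAdvance xs (fun x => decide (x < j)) i = xs.countP (fun x => decide (x < j)) := by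
  exact bAdvance_count xs _ (countP_down_sorted xs _
    (fun a b hab hb => by simp at hb ⊢; omega) hs) xs.length i (by omega) hi

-- ---- phase 2: A's prefix-sum scan and B's two-pointer sweep stay in lock step ----

lemma phase2 (n : Int) (l r : List Int) (maxx : Int) (F : List Int)
    (starts ends : List Int)
    (hps : starts.Pairwise (· ≤ ·)) (hpe : ends.Pairwise (· ≤ ·))
    (hFlen : F.length = (maxx + 2).toNat)
    (hF : ∀ j : Nat, psum F j = coverC n l r (j : Int))
    (hcs : ∀ j : Int, ((starts.countP (fun x => decide (x ≤ j))) : Int)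
        - ((ends.countP (fun x => decide (x < j))) : Int) = coverC n l r j)
    (k : Nat) (hk : (k : Int) ≤ maxx) :
    ((PySem.List.pyRange 0 ((k : Int) + 1) 1).foldl (bStep starts ends) (0, 0, 0, none))
      = (starts.countP (fun x => decide (x ≤ (k : Int))),
         ends.countP (fun x => decide (x < (k : Int))),
         ((PySem.List.pyRange 1 ((k : Int) + 1) 1).foldl aScanL
            (0, PySem.List.pyGetD F 0 0, F)).1,
         some ((PySem.List.pyRange 1 ((k : Int) + 1) 1).foldl aScanL
            (0, PySem.List.pyGetD F 0 0, F)).2.1) ∧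
    (∀ m : Nat, k < m →
      ((PySem.List.pyRange 1 ((k : Int) + 1) 1).foldl aScanL
        (0, PySem.List.pyGetD F 0 0, F)).2.2.getD m 0 = F.getD m 0) ∧
    ((PySem.List.pyRange 1 ((k : Int) + 1) 1).foldl aScanL
        (0, PySem.List.pyGetD F 0 0, F)).2.2.getD k 0 = psum F k ∧
    ((PySem.List.pyRange 1 ((k : Int) + 1) 1).foldl aScanL
        (0, PySem.List.pyGetD F 0 0, F)).2.2.length = F.length := by
  induction k with
  | zero =>
    have eA : PySem.List.pyRange 1 (((0 : Nat) : Int) + 1) 1 = [] :=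
      PySem.List.pyRange_one_eq_nil (by norm_num)
    have eB : PySem.List.pyRange 0 (((0 : Nat) : Int) + 1) 1 = [0] := by
      rw [(by norm_num : ((0 : Nat) : Int) + 1 = 0 + 1)]
      exact PySem.List.pyRange_one_singleton 0
    rw [eA, eB]
    simp only [List.foldl_cons, List.foldl_nil]
    have hb1 : bAdvance starts (fun x => decide (x ≤ (0 : Int))) 0
        = starts.countP (fun x => decide (x ≤ (0 : Int))) :=
      bAdvance_le starts hps 0 0 (by omega)
    have hb2 : bAdvance ends (fun x => decide (x < (0 : Int))) 0
        = ends.countP (fun x => decide (x < (0 : Int))) :=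
      bAdvance_lt ends hpe 0 0 (by omega)
    have hc0 : ((starts.countP (fun x => decide (x ≤ (0 : Int)))) : Int)
        - ((ends.countP (fun x => decide (x < (0 : Int)))) : Int)
        = PySem.List.pyGetD F 0 0 := by
      rw [hcs 0, PySem.List.pyGetD_zero, ← psum_zero]
      have := hF 0
      push_cast at this ⊢
      omega
    unfold bStep
    simp only [hb1, hb2]
    exact ⟨by rw [hc0]; norm_cast, fun m hm => trivial, by rw [psum_zero], trivial⟩
  | succ k ih =>
    obtain ⟨ihB, ih3, ih4, ih5⟩ := ih (by omega)
    have hrangeA : PySem.List.pyRange 1 (((k + 1 : Nat) : Int) + 1) 1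
        = PySem.List.pyRange 1 ((k : Int) + 1) 1 ++ [((k + 1 : Nat) : Int)] := by
      push_cast
      exact PySem.List.pyRange_one_succ_right (by omega)
    have hrangeB : PySem.List.pyRange 0 (((k + 1 : Nat) : Int) + 1) 1
        = PySem.List.pyRange 0 ((k : Int) + 1) 1 ++ [((k + 1 : Nat) : Int)] := by
      push_cast
      exact PySem.List.pyRange_one_succ_right (by omega)
    rw [hrangeA, hrangeB]
    simp only [List.foldl_append, List.foldl_cons, List.foldl_nil]
    set sA := (PySem.List.pyRange 1 ((k : Int) + 1) 1).foldl aScanL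
        (0, PySem.List.pyGetD F 0 0, F) with hsA
    rw [ihB]
    have hk1 : k + 1 < F.length := by rw [hFlen]; omega
    -- B's two pointers advance to the counts at k+1
    have hmonoS : starts.countP (fun x => decide (x ≤ (k : Int)))
        ≤ starts.countP (fun x => decide (x ≤ ((k + 1 : Nat) : Int))) :=
      List.countP_mono_left (fun x _ h => by simp at h ⊢; omega)
    have hmonoE : ends.countP (fun x => decide (x < (k : Int)))
        ≤ ends.countP (fun x => decide (x < ((k + 1 : Nat) : Int))) :=
      List.countP_mono_left (fun x _ h => by simp at h ⊢; omega)
    have hb1 := bAdvance_le starts hps ((k + 1 : Nat) : Int)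
      (starts.countP (fun x => decide (x ≤ (k : Int)))) hmonoS
    have hb2 := bAdvance_lt ends hpe ((k + 1 : Nat) : Int)
      (ends.countP (fun x => decide (x < (k : Int)))) hmonoE
    -- A's new cell value is psum F (k+1), which equals B's new count difference
    have hget1 : PySem.List.pyGetD sA.2.2 ((k + 1 : Nat) : Int) 0 = F.getD (k + 1) 0 := by
      rw [PySem.List.pyGetD_natCast, ih3 (k + 1) (by omega)]
    have hgetk : PySem.List.pyGetD sA.2.2 (((k + 1 : Nat) : Int) - 1) 0 = psum F k := by
      have : ((k + 1 : Nat) : Int) - 1 = (k : Nat) := by push_cast; ring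
      rw [this, PySem.List.pyGetD_natCast, ih4]
    have hset : PySem.List.pySetD sA.2.2 ((k + 1 : Nat) : Int)
          (PySem.List.pyGetD sA.2.2 ((k + 1 : Nat) : Int) 0
            + PySem.List.pyGetD sA.2.2 (((k + 1 : Nat) : Int) - 1) 0)
        = sA.2.2.set (k + 1) (psum F (k + 1)) := by
      rw [PySem.List.pySetD_natCast, hget1, hgetk, psum_succ]
      congr 1; ring
    have hlen' : k + 1 < sA.2.2.length := by rw [ih5]; exact hk1
    have hnewget : (sA.2.2.set (k + 1) (psum F (k + 1))).getD (k + 1) 0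
        = psum F (k + 1) := by
      rw [List.getD_eq_getElem _ 0 (by simpa using hlen'), List.getElem_set_self]
    have hc : ((starts.countP (fun x => decide (x ≤ ((k + 1 : Nat) : Int)))) : Int)
        - ((ends.countP (fun x => decide (x < ((k + 1 : Nat) : Int)))) : Int)
        = psum F (k + 1) := by
      rw [hcs ((k + 1 : Nat) : Int), hF (k + 1)]
    unfold aScanL bStep
    simp only [hset, hb1, hb2, hc]
    rw [PySem.List.pyGetD_natCast, hnewget]
    by_cases hcond : psum F (k + 1) > sA.2.1
    · rw [if_pos hcond, if_pos hcond]
      refine ⟨rfl, ?_, ?_, ?_⟩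
      · intro m hm
        simp only []
        rw [List.getD_eq_getElem?_getD, List.getElem?_set_ne (by omega),
          ← List.getD_eq_getElem?_getD, ih3 m (by omega)]
      · simp only []
        rw [List.getD_eq_getElem _ 0 (by simpa using hlen'), List.getElem_set_self]
      · simp only [List.length_set, ih5]
    · rw [if_neg hcond, if_neg hcond]
      refine ⟨rfl, ?_, ?_, ?_⟩
      · intro m hm
        simp only []
        rw [List.getD_eq_getElem?_getD, List.getElem?_set_ne (by omega),
          ← List.getD_eq_getElem?_getD, ih3 m (by omega)]
      · simp only []
        rw [List.getD_eq_getElem _ 0 (by simpa using hlen'), List.getElem_set_self]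
      · simp only [List.length_set, ih5]

-- ===== VERDICT (by name: the statement is the Claim_ definition above) =====
theorem maxOccured_spec : Claim_equal_maxOccured := by
  intro n l r maxx hdom hpre
  obtain ⟨hm, hln, hrn, hbl', hbr'⟩ := hpre
  unfold Spec_maxOccured maxOccured maxOccured_alt
  dsimp only
  by_cases hmx : maxx ≤ -1
  · rw [PySem.List.pyRange_one_eq_nil (by omega : maxx + 1 ≤ 1),
      PySem.List.pyRange_one_eq_nil (by omega : maxx + 1 ≤ 0)]
    rfl
  · have hNl : n.toNat ≤ l.length := by omega
    have hNr : n.toNat ≤ r.length := by omega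
    have hbl : ∀ k, k < n.toNat → ∀ h2 : k < l.length, 0 ≤ l[k] ∧ l[k] ≤ maxx + 1 := by
      intro k hk h2
      exact hbl' l[k] (by
        have : (l.take n.toNat)[k]'(by simp; omega) = l[k] := List.getElem_take
        rw [← this]; exact List.getElem_mem _)
    have hbr : ∀ k, k < n.toNat → ∀ h2 : k < r.length, -1 ≤ r[k] ∧ r[k] ≤ maxx := by
      intro k hk h2
      exact hbr' r[k] (by
        have : (r.take n.toNat)[k]'(by simp; omega) = r[k] := List.getElem_take
        rw [← this]; exact List.getElem_mem _)
    obtain ⟨hFlen, hFsum⟩ := phase1 l r maxx n.toNat hNl hNr hbl hbr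
    set FL := (PySem.List.pyRange 0 (n.toNat : Int) 1).foldl (aAddL l r)
        (List.replicate (maxx + 2).toNat 0) with hFLdef
    have hcov : ∀ j : Nat, psum FL j = coverC n l r (j : Int) := fun j =>
      (hFsum j).trans (coverC_toNat n l r (j : Int)).symm
    -- A's array fold is the list fold
    have hAfold : ((PySem.List.pyRange 0 n 1).foldl (aAdd l r)
        (Array.replicate (maxx + 2).toNat 0)).toList = FL := by
      rw [foldA_toList, Array.toList_replicate, pyRange_zero_toNat]
    set FA := (PySem.List.pyRange 0 n 1).foldl (aAdd l r)
        (Array.replicate (maxx + 2).toNat 0) with hFAdef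
    -- B's sorted endpoint lists
    set starts := PySem.List.sorted
      ((PySem.List.pyRange 0 n 1).map (fun i => PySem.List.pyGetD l i 0)) (fun x => x) false
      with hstarts
    set ends := PySem.List.sorted
      ((PySem.List.pyRange 0 n 1).map (fun i => PySem.List.pyGetD r i 0)) (fun x => x) false
      with hends
    have hps : starts.Pairwise (· ≤ ·) := by
      have := PySem.List.sorted_pairwise
        ((PySem.List.pyRange 0 n 1).map (fun i => PySem.List.pyGetD l i 0)) (fun x => x)
      simpa using this
    have hpe : ends.Pairwise (· ≤ ·) := by
      have := PySem.List.sorted_pairwise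
        ((PySem.List.pyRange 0 n 1).map (fun i => PySem.List.pyGetD r i 0)) (fun x => x)
      simpa using this
    have hcs : ∀ j : Int, ((starts.countP (fun x => decide (x ≤ j))) : Int)
        - ((ends.countP (fun x => decide (x < j))) : Int) = coverC n l r j := by
      intro j
      have h1 : starts.countP (fun x => decide (x ≤ j))
          = (PySem.List.pyRange 0 n 1).countP
              (fun i => decide (PySem.List.pyGetD l i 0 ≤ j)) := by
        rw [hstarts, List.Perm.countP_eq _ (PySem.List.sorted_perm _ _ _), List.countP_map]
        rfl
      have h2 : ends.countP (fun x => decide (x < j))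
          = (PySem.List.pyRange 0 n 1).countP
              (fun i => decide (PySem.List.pyGetD r i 0 < j)) := by
        rw [hends, List.Perm.countP_eq _ (PySem.List.sorted_perm _ _ _), List.countP_map]
        rfl
      rw [h1, h2]
      rfl
    have hmxr : maxx + 1 = (maxx.toNat : Int) + 1 := by omega
    obtain ⟨hB, -, -, -⟩ := phase2 n l r maxx FL starts ends hps hpe hFlen hcov hcs
      maxx.toNat (by omega)
    -- read the answer off both folds
    rw [hmxr, hB]
    -- A's fold over the array projects to the list fold
    show (List.foldl aScan (0, pvAGet FA 0, FA)
        (PySem.List.pyRange 1 ((maxx.toNat : Int) + 1) 1)).1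
      = (List.foldl aScanL (0, PySem.List.pyGetD FL 0 0, FL)
        (PySem.List.pyRange 1 ((maxx.toNat : Int) + 1) 1)).1
    have hinit : pvAGet FA 0 = PySem.List.pyGetD FL 0 0 := by
      rw [pvAGet_eq, hAfold]
    have hcorr := congrArg (fun t : Int × Int × List Int => t.1)
      (foldScan_corr (PySem.List.pyRange 1 ((maxx.toNat : Int) + 1) 1) (0, pvAGet FA 0, FA))
    dsimp only at hcorr
    rw [hcorr, hAfold, hinit]
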